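/-
  WHAT A WALK OF A SMALL CHECK ROUTINE MEETS (`__asan_{load,store}{1,2,4,8}_noabort`, c/asan_rt.c `small_bad`): the forms the
  stepper leaves for `shr rcx, 3`, `cmp byte [rcx + C00000H], 0`, `movzx edx, byte [rdx + C00000H]`, `and eax, 7`, `cmp dl, al ; jle`,
  and their meaning in the vocabulary of Asan/Shadow.lean (`shadowOf`, `Accessible`). With these the four failing paths of a routine
  are infeasible from `AccessibleSmall` by `omega` (the worked proof of `__asan_load8_noabort`: the farm's prompt).
-/
import Asan.Check
namespace Asan
open X86 X86.User

/-- The value of a word shifted right by 3: its granule. -/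
theorem toNat_shr3 (a : Word) : (a >>> 3).toNat = a.toNat / 8 := by
  rw [UInt64.toNat_shiftRight]
  have e : (3 : UInt64).toNat % 64 = 3 := by decide
  rw [e, Nat.shiftRight_eq_div_pow]

/-- The shadow byte a check routine loads for the address `x`: `movzx / cmp byte [ (x >> 3) + C00000H ]`. -/
theorem readLE_shadow (mem : Mem) (x : Word) : mem.readLE (x >>> 3 + 12582912) 1 = shadowOf mem (x.toNat / 8) := by
  have e : (x >>> 3 + 12582912 : Word) = shadowAddr (x.toNat / 8) := shr3_add_offset x
  rw [e, readLE_shadowAddr]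

/-- A shadow byte, zero-extended by `movzx` and compared as a byte: its value. -/
theorem byte_toNat (s : Nat) (hs : s < 256) :
    (BitVec.setWidth 8 (BitVec.zeroExtend 32 (BitVec.ofNat 8 s))).toNat = s := by
  simp only [BitVec.toNat_setWidth, BitVec.toNat_ofNat, BitVec.zeroExtend]
  omega

/-- … and as a SIGNED byte (`jle` after `cmp dl, al`), in a form `omega` reads: `s` for `s < 128`, `s − 256` from 128 up. -/
theorem byte_toInt (s : Nat) (hs : s < 256) :
    (BitVec.setWidth 8 (BitVec.zeroExtend 32 (BitVec.ofNat 8 s))).toInt = (s : Int) - 256 * ((s / 128 : Nat) : Int) := by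
  rw [BitVec.toInt_eq_toNat_cond, byte_toNat s hs]
  split <;> omega

/-- `and eax, 7` of a 32-bit value, as a signed byte: the value modulo 8. -/
theorem and7_toInt (y : BitVec 32) : (BitVec.setWidth 8 (y &&& 7#32)).toInt = ((y.toNat % 8 : Nat) : Int) := by
  have h : (BitVec.setWidth 8 (y &&& 7#32)).toNat = y.toNat % 8 := by
    simp only [BitVec.toNat_setWidth, BitVec.toNat_and, BitVec.toNat_ofNat]
    have e7 : (7 : Nat) % 2 ^ 32 = 2 ^ 3 - 1 := by decide
    rw [e7, Nat.and_two_pow_sub_one_eq_mod]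
    omega
  rw [BitVec.toInt_eq_toNat_cond, h]
  split <;> omega

/-- The low 32 bits of a register, as a number. -/
theorem part32_toNat (x : Word) : (Word.part Width.w32 x).toNat = x.toNat % 2 ^ 32 := by
  unfold Word.part
  simp only [Width.bits, BitVec.toNat_setWidth, UInt64.toNat_toBitVec]

/-- The first granule of an accessible range that meets two granules has shadow 0. -/
theorem Accessible.first_zero {mem : Mem} {a n : Nat} (h : Accessible mem a n) (hn : 0 < n)
    (hne : a / 8 ≠ (a + n - 1) / 8) : shadowOf mem (a / 8) = 0 :=
  h.full (a / 8) (Nat.le_refl _) (by omega)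

/-- The shadow byte `s` of the last byte of an accessible range: 0, or a partial granule that still covers the byte. -/
theorem Accessible.last_ok {mem : Mem} {a n : Nat} (h : Accessible mem a n) :
    shadowOf mem ((a + n - 1) / 8) = 0 ∨
      ((a + n - 1) % 8 < shadowOf mem ((a + n - 1) / 8) ∧ shadowOf mem ((a + n - 1) / 8) < 128) := by
  have := h.last
  unfold ByteOK ByteOKv shadowByte at this
  exact this

end Asan
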